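-- pv_equiv track=rewrite | github.com/marcelowf/Analysis-of-Lotofacil-subsets | Data_Analysis/SB15_13.py | find_subsets_of_15_that_contain_13
-- ===== SOURCE A (Python) =====
-- def find_subsets_of_15_that_contain_13(combinations_15, combinations_13):
--     subset = []
--     set_13 = set(map(tuple, combinations_13))
--
--     for comb15 in combinations_15:
--         comb15_set = set(comb15)
--         matching_subsets = {subset_13 for subset_13 in set_13 if set(subset_13).issubset(comb15_set)}
--         if matching_subsets:
--             subset.append(comb15)
--             set_13 -= matching_subsets
--         if not set_13:
--             break
--
--     return subset
-- ===== SOURCE B (Python) =====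
-- def _first_covering_index(combinations_15, ts):
--     for i, comb15 in enumerate(combinations_15):
--         if ts.issubset(set(comb15)):
--             return i
--     return None
--
--
-- def find_subsets_of_15_that_contain_13(combinations_15, combinations_13):
--     chosen_indices = set()
--     for comb13 in combinations_13:
--         idx = _first_covering_index(combinations_15, set(comb13))
--         if idx is not None:
--             chosen_indices.add(idx)
--     return [combinations_15[i] for i in sorted(chosen_indices)]
-- ===== Notes on version B (the rewrite author's own statement) =====
-- stated objective: alternative
-- what changed: B inverts A's loop nesting: instead of A's online greedy scan over 15-combos that mutates the set of remaining 13-subsets, B computes for each 13-subset the index of the first 15-combo covering it and returns the combos at the sorted distinct indices.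
import Mathlib
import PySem

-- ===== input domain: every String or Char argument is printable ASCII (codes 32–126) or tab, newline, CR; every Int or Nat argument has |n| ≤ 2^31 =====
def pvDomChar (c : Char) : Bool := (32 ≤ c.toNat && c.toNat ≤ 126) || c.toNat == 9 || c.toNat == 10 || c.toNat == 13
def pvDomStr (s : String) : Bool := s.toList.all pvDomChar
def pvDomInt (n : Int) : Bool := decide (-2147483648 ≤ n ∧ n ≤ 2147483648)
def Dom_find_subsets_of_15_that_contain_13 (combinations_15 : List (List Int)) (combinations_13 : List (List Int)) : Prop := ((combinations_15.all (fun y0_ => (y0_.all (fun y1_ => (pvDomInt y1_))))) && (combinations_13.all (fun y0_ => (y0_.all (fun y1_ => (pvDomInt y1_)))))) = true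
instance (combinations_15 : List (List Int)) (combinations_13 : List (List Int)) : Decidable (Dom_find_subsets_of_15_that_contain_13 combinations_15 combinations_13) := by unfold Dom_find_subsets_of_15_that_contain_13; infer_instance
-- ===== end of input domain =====

-- B inverts A's loop nesting: for each 13-subset it finds the first covering 15-combo's index and
-- returns the combos at the sorted distinct indices, instead of A's online greedy set removal (objective: alternative).

-- ===== PORT A =====
-- set(t).issubset(set(c)) — the subset test both Pythons perform
def pySubset13 (t c : List Int) : Bool :=
  PySem.Set.issubset (PySem.Set.ofList t) (PySem.Set.ofList c)

-- the 'for comb15 in combinations_15' loop of A, with its break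
def findALoop : List (List Int) → PySem.Set (List Int) → List (List Int) → List (List Int)
  | [], _, subset => subset
  | comb15 :: rest, set13, subset =>
    let matching := set13.filter (fun t => pySubset13 t comb15)
    let st := if matching.isEmpty then (subset, set13)
              else (subset ++ [comb15], PySem.Set.diff set13 matching)
    if st.2.isEmpty then st.1 else findALoop rest st.2 st.1

def find_subsets_of_15_that_contain_13 (combinations_15 : List (List Int)) (combinations_13 : List (List Int)) : List (List Int) :=
  findALoop combinations_15 (PySem.Set.ofList combinations_13) []

-- ===== PORT B =====
-- B's helper _first_covering_index: first i with set(comb13) ⊆ set(combinations_15[i]), else None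
def firstCoveringIndex (combinations_15 : List (List Int)) (t : List Int) : Option Nat :=
  match combinations_15 with
  | [] => none
  | c :: rest => if pySubset13 t c then some 0 else (firstCoveringIndex rest t).map (· + 1)

-- the chosen_indices set built by B's main loop
def chosenIndices (combinations_15 : List (List Int)) (combinations_13 : List (List Int)) : PySem.Set Nat :=
  combinations_13.foldl (fun s comb13 =>
    match firstCoveringIndex combinations_15 comb13 with
    | some i => PySem.Set.add s i
    | none => s) PySem.Set.empty

def find_subsets_of_15_that_contain_13_alt (combinations_15 : List (List Int)) (combinations_13 : List (List Int)) : List (List Int) :=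
  -- combinations_15[i]: i comes from _first_covering_index, always a valid index
  (PySem.List.sorted (chosenIndices combinations_15 combinations_13) (fun i => i) false).map
    (fun i => combinations_15.getD i [])

-- ===== PRECONDITION & SPEC =====
def Spec_find_subsets_of_15_that_contain_13 (combinations_15 : List (List Int)) (combinations_13 : List (List Int)) (out : List (List Int)) : Prop := out = find_subsets_of_15_that_contain_13_alt combinations_15 combinations_13
instance (combinations_15 : List (List Int)) (combinations_13 : List (List Int)) (out : List (List Int)) : Decidable (Spec_find_subsets_of_15_that_contain_13 combinations_15 combinations_13 out) := by unfold Spec_find_subsets_of_15_that_contain_13; infer_instance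

-- ===== CLAIM (what is proved, stated in full; the proofs are below) =====
def Claim_equal_find_subsets_of_15_that_contain_13 : Prop := ∀ (combinations_15 : List (List Int)) (combinations_13 : List (List Int)), Dom_find_subsets_of_15_that_contain_13 combinations_15 combinations_13 → Spec_find_subsets_of_15_that_contain_13 combinations_15 combinations_13 (find_subsets_of_15_that_contain_13 combinations_15 combinations_13)

-- ===== LEMMAS AND PROOFS =====

-- proof-side common form: greedy selection without accumulator, break or dedup
def hsel : List (List Int) → List (List Int) → List (List Int)
  | [], _ => []
  | c :: rest, ts =>
    if ts.any (fun t => pySubset13 t c)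
    then c :: hsel rest (ts.filter (fun t => !pySubset13 t c))
    else hsel rest ts

theorem hsel_nil (cs : List (List Int)) : hsel cs [] = [] := by
  induction cs with
  | nil => rfl
  | cons c rest ih => simp [hsel, ih]

theorem hsel_congr (cs : List (List Int)) : ∀ ts₁ ts₂ : List (List Int),
    (∀ x, x ∈ ts₁ ↔ x ∈ ts₂) → hsel cs ts₁ = hsel cs ts₂ := by
  induction cs with
  | nil => intro _ _ _; rfl
  | cons c rest ih =>
    intro ts₁ ts₂ h
    have hany : ts₁.any (fun t => pySubset13 t c) = ts₂.any (fun t => pySubset13 t c) := by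
      rw [Bool.eq_iff_iff, List.any_eq_true, List.any_eq_true]
      constructor <;> rintro ⟨x, hx, hpx⟩
      · exact ⟨x, (h x).1 hx, hpx⟩
      · exact ⟨x, (h x).2 hx, hpx⟩
    simp only [hsel, hany]
    by_cases h2 : ts₂.any (fun t => pySubset13 t c) = true
    · rw [if_pos h2, if_pos h2]
      congr 1
      apply ih
      intro x; simp only [List.mem_filter]
      exact and_congr_left (fun _ => h x)
    · rw [if_neg h2, if_neg h2]
      exact ih ts₁ ts₂ h

theorem findALoop_eq (cs : List (List Int)) : ∀ (ts acc : List (List Int)),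
    findALoop cs ts acc = acc ++ hsel cs ts := by
  induction cs with
  | nil =>
    intro ts acc
    show acc = acc ++ hsel [] ts
    rw [show hsel [] ts = [] from rfl, List.append_nil]
  | cons c rest ih =>
    intro ts acc
    by_cases hany : ts.any (fun t => pySubset13 t c) = true
    · have hm : (ts.filter (fun t => pySubset13 t c)).isEmpty = false := by
        rw [List.any_eq_true] at hany
        obtain ⟨x, hx, hpx⟩ := hany
        rw [List.isEmpty_eq_false_iff_exists_mem]
        exact ⟨x, List.mem_filter.2 ⟨hx, hpx⟩⟩
      simp only [findALoop, hm, Bool.false_eq_true, if_false]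
      have hdiff : ∀ x, x ∈ PySem.Set.diff ts (ts.filter (fun t => pySubset13 t c)) ↔
          x ∈ ts.filter (fun t => !pySubset13 t c) := by
        intro x
        rw [PySem.Set.mem_diff]
        simp only [List.mem_filter, Bool.not_eq_true']
        constructor
        · rintro ⟨hx, hnx⟩
          refine ⟨hx, ?_⟩
          cases hp : pySubset13 x c
          · rfl
          · exact absurd ⟨hx, hp⟩ hnx
        · rintro ⟨hx, hp⟩
          exact ⟨hx, fun hc => by rw [hc.2] at hp; cases hp⟩
      by_cases he : (PySem.Set.diff ts (ts.filter (fun t => pySubset13 t c))).isEmpty = true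
      · rw [he]
        simp only [if_true]
        have hnil : ts.filter (fun t => !pySubset13 t c) = [] := by
          rw [List.eq_nil_iff_forall_not_mem]
          intro x hx
          have := (hdiff x).2 hx
          rw [List.isEmpty_iff] at he
          simp [he] at this
        simp [hsel, hany, hnil, hsel_nil]
      · rw [Bool.not_eq_true] at he; rw [he]
        simp only [Bool.false_eq_true, if_false]
        rw [ih]
        rw [hsel_congr rest _ _ hdiff]
        simp [hsel, hany]
    · rw [Bool.not_eq_true] at hany
      have hm : (ts.filter (fun t => pySubset13 t c)).isEmpty = true := by
        rw [List.isEmpty_iff, List.filter_eq_nil_iff]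
        intro x hx
        rw [List.any_eq_false] at hany
        simpa using hany x hx
      simp only [findALoop, hm, if_true]
      by_cases he : ts.isEmpty = true
      · rw [he]; simp only [if_true]
        rw [List.isEmpty_iff] at he
        subst he
        rw [hsel_nil, List.append_nil]
      · rw [Bool.not_eq_true] at he; rw [he]
        simp only [Bool.false_eq_true, if_false]
        rw [ih]
        simp [hsel, hany]

-- membership in B's chosen index set
theorem mem_chosenIndices (cs : List (List Int)) : ∀ (ts : List (List Int)) (s : PySem.Set Nat) (i : Nat),
    i ∈ ts.foldl (fun s t => match firstCoveringIndex cs t with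
      | some j => PySem.Set.add s j
      | none => s) s ↔ i ∈ s ∨ ∃ t ∈ ts, firstCoveringIndex cs t = some i := by
  intro ts
  induction ts with
  | nil => intro s i; simp
  | cons t rest ih =>
    intro s i
    simp only [List.foldl_cons]
    cases hf : firstCoveringIndex cs t with
    | none =>
      rw [ih]
      constructor
      · rintro (h | ⟨u, hu, he⟩)
        · exact Or.inl h
        · exact Or.inr ⟨u, List.mem_cons_of_mem _ hu, he⟩
      · rintro (h | ⟨u, hu, he⟩)
        · exact Or.inl h
        · rcases List.mem_cons.1 hu with rfl | hu
          · rw [hf] at he; cases he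
          · exact Or.inr ⟨u, hu, he⟩
    | some j =>
      rw [ih, PySem.Set.mem_add]
      constructor
      · rintro ((h | rfl) | ⟨u, hu, he⟩)
        · exact Or.inl h
        · exact Or.inr ⟨t, List.mem_cons_self .., hf⟩
        · exact Or.inr ⟨u, List.mem_cons_of_mem _ hu, he⟩
      · rintro (h | ⟨u, hu, he⟩)
        · exact Or.inl (Or.inl h)
        · rcases List.mem_cons.1 hu with rfl | hu
          · rw [hf] at he; exact Or.inl (Or.inr (Option.some.inj he).symm)
          · exact Or.inr ⟨u, hu, he⟩

theorem nodup_chosenIndices (cs : List (List Int)) : ∀ (ts : List (List Int)) (s : PySem.Set Nat),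
    s.Nodup → (ts.foldl (fun s t => match firstCoveringIndex cs t with
      | some j => PySem.Set.add s j
      | none => s) s).Nodup := by
  intro ts
  induction ts with
  | nil => intro s hs; exact hs
  | cons t rest ih =>
    intro s hs
    simp only [List.foldl_cons]
    cases hf : firstCoveringIndex cs t with
    | none => exact ih s hs
    | some j => exact ih _ (PySem.Set.nodup_add s j hs)

-- main lemma: any strictly increasing list of exactly the first-covering indices maps to hsel
theorem map_getD_eq_hsel (cs : List (List Int)) : ∀ (ts : List (List Int)) (l : List Nat),
    l.Pairwise (· < ·) →
    (∀ i, i ∈ l ↔ ∃ t ∈ ts, firstCoveringIndex cs t = some i) →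
    l.map (fun i => cs.getD i []) = hsel cs ts := by
  induction cs with
  | nil =>
    intro ts l _ hmem
    have hl : l = [] := by
      rw [List.eq_nil_iff_forall_not_mem]
      intro i hi
      obtain ⟨t, _, he⟩ := (hmem i).1 hi
      cases he
    simp [hl, hsel]
  | cons c rest ih =>
    intro ts l hsort hmem
    by_cases hany : ts.any (fun t => pySubset13 t c) = true
    · -- index 0 is chosen
      have h0 : 0 ∈ l := by
        rw [List.any_eq_true] at hany
        obtain ⟨t, ht, hpt⟩ := hany
        exact (hmem 0).2 ⟨t, ht, by simp [firstCoveringIndex, hpt]⟩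
      obtain ⟨a, l', rfl⟩ : ∃ a l', l = a :: l' := by
        cases l with
        | nil => cases h0
        | cons a l' => exact ⟨a, l', rfl⟩
      have ha : a = 0 := by
        rcases List.mem_cons.1 h0 with h | h
        · exact h.symm
        · exact absurd (List.rel_of_pairwise_cons hsort h) (by omega)
      subst ha
      have hpos : ∀ j ∈ l', 1 ≤ j := by
        intro j hj
        have := List.rel_of_pairwise_cons hsort hj
        omega
      have hsort' : l'.Pairwise (· < ·) := hsort.of_cons
      have hmapsort : (l'.map (· - 1)).Pairwise (· < ·) := by
        rw [List.pairwise_map]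
        refine hsort'.imp_of_mem ?_
        intro a b ha hb hab
        have := hpos a ha
        omega
      have hmem' : ∀ i, i ∈ l'.map (· - 1) ↔
          ∃ t ∈ ts.filter (fun t => !pySubset13 t c), firstCoveringIndex rest t = some i := by
        intro i
        rw [List.mem_map]
        constructor
        · rintro ⟨j, hj, rfl⟩
          have hj1 := hpos j hj
          have hjl : j ∈ (0 :: l') := List.mem_cons_of_mem _ hj
          obtain ⟨t, ht, he⟩ := (hmem j).1 hjl
          simp only [firstCoveringIndex] at he
          by_cases hp : pySubset13 t c = true
          · simp [hp] at he; omega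
          · simp only [hp, Bool.false_eq_true, if_false, Option.map_eq_some_iff] at he
            obtain ⟨k, hk, hkj⟩ := he
            refine ⟨t, List.mem_filter.2 ⟨ht, by simp [hp]⟩, ?_⟩
            rw [hk]; congr 1; omega
        · rintro ⟨t, ht, he⟩
          obtain ⟨ht, hpt⟩ := List.mem_filter.1 ht
          have hp : pySubset13 t c = false := by simpa using hpt
          have hfc : firstCoveringIndex (c :: rest) t = some (i + 1) := by
            simp [firstCoveringIndex, hp, he]
          have hi1 : i + 1 ∈ (0 :: l') := (hmem (i + 1)).2 ⟨t, ht, hfc⟩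
          rcases List.mem_cons.1 hi1 with h | h
          · cases h
          · exact ⟨i + 1, h, rfl⟩
      have hih := ih (ts.filter (fun t => !pySubset13 t c)) (l'.map (· - 1)) hmapsort hmem'
      simp only [hsel, hany, if_true]
      rw [List.map_cons]
      congr 1
      rw [← hih, List.map_map]
      apply List.map_congr_left
      intro j hj
      have hj1 := hpos j hj
      obtain ⟨j', rfl⟩ : ∃ j', j = j' + 1 := ⟨j - 1, by omega⟩
      simp [List.getD]
    · -- no 13-subset matches c
      rw [Bool.not_eq_true] at hany
      have hnone : ∀ t ∈ ts, pySubset13 t c = false := by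
        rw [List.any_eq_false] at hany
        intro t ht; simpa using hany t ht
      have hpos : ∀ j ∈ l, 1 ≤ j := by
        intro j hj
        obtain ⟨t, ht, he⟩ := (hmem j).1 hj
        simp only [firstCoveringIndex, hnone t ht, Bool.false_eq_true, if_false,
          Option.map_eq_some_iff] at he
        obtain ⟨k, _, hkj⟩ := he
        omega
      have hmapsort : (l.map (· - 1)).Pairwise (· < ·) := by
        rw [List.pairwise_map]
        refine hsort.imp_of_mem ?_
        intro a b ha hb hab
        have := hpos a ha
        omega
      have hmem' : ∀ i, i ∈ l.map (· - 1) ↔ ∃ t ∈ ts, firstCoveringIndex rest t = some i := by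
        intro i
        rw [List.mem_map]
        constructor
        · rintro ⟨j, hj, rfl⟩
          have hj1 := hpos j hj
          obtain ⟨t, ht, he⟩ := (hmem j).1 hj
          simp only [firstCoveringIndex, hnone t ht, Bool.false_eq_true, if_false,
            Option.map_eq_some_iff] at he
          obtain ⟨k, hk, hkj⟩ := he
          refine ⟨t, ht, ?_⟩
          rw [hk]; congr 1; omega
        · rintro ⟨t, ht, he⟩
          have hfc : firstCoveringIndex (c :: rest) t = some (i + 1) := by
            simp [firstCoveringIndex, hnone t ht, he]
          exact ⟨i + 1, (hmem (i + 1)).2 ⟨t, ht, hfc⟩, rfl⟩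
      have hih := ih ts (l.map (· - 1)) hmapsort hmem'
      simp only [hsel, hany, Bool.false_eq_true, if_false]
      rw [← hih, List.map_map]
      apply List.map_congr_left
      intro j hj
      have hj1 := hpos j hj
      obtain ⟨j', rfl⟩ : ∃ j', j = j' + 1 := ⟨j - 1, by omega⟩
      simp [List.getD]

-- ===== VERDICT (by name: the statement is the Claim_ definition above) =====
theorem find_subsets_of_15_that_contain_13_spec : Claim_equal_find_subsets_of_15_that_contain_13 := by
  intro cs ts _
  unfold Spec_find_subsets_of_15_that_contain_13
  have hB : find_subsets_of_15_that_contain_13_alt cs ts = hsel cs ts := by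
    unfold find_subsets_of_15_that_contain_13_alt
    have hnodup : (chosenIndices cs ts).Nodup :=
      nodup_chosenIndices cs ts PySem.Set.empty List.nodup_nil
    have hperm : (PySem.List.sorted (chosenIndices cs ts) (fun i => i) false).Perm
        (chosenIndices cs ts) := PySem.List.sorted_perm _ _ _
    apply map_getD_eq_hsel
    · have hle : (PySem.List.sorted (chosenIndices cs ts) (fun i => i) false).Pairwise
          (fun a b => a ≤ b) := PySem.List.sorted_pairwise _ _
      have hnd : (PySem.List.sorted (chosenIndices cs ts) (fun i => i) false).Nodup :=
        hperm.nodup_iff.2 hnodup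
      exact (hle.and hnd).imp (fun h => lt_of_le_of_ne h.1 h.2)
    · intro i
      rw [PySem.List.mem_sorted]
      unfold chosenIndices
      rw [mem_chosenIndices]
      simp [PySem.Set.empty]
  unfold find_subsets_of_15_that_contain_13
  rw [findALoop_eq, List.nil_append, hB]
  exact hsel_congr cs (PySem.Set.ofList ts) ts (fun x => PySem.Set.mem_ofList ts x)
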